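-- pv_equiv track=rewrite | github.com/cahoots-org/contex | src/core/rbac_middleware.py | _path_matches
-- ===== SOURCE A (Python) =====
-- def _path_matches(path: str, pattern: str) -> bool:
--     """Check if a path matches a pattern (supports * wildcard)"""
--     if "*" not in pattern:
--         return path.startswith(pattern)
--
--     # Simple wildcard matching
--     parts = pattern.split("*")
--     if not path.startswith(parts[0]):
--         return False
--
--     current_pos = len(parts[0])
--     for part in parts[1:]:
--         if not part:
--             continue
--         pos = path.find(part, current_pos)
--         if pos == -1:
--             return False
--         current_pos = pos + len(part)
--
--     return True
-- ===== SOURCE B (Python) =====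
-- def _path_matches(path: str, pattern: str) -> bool:
--     """Wildcard-prefix match via bottom-up dynamic programming over the pattern.
--
--     ok[i] records whether pattern[j:] matches some prefix of path[i:]; rows are
--     computed for j = len(pattern) down to 0, so no splitting or substring search
--     is needed and the '*'-free case is not special.
--     """
--     n = len(path)
--     ok = [True] * (n + 1)  # j == len(pattern): the empty pattern matches anywhere
--     for j in range(len(pattern) - 1, -1, -1):
--         if pattern[j] == "*":
--             # suffix-or: new[i] = any(ok[i:])
--             new = []
--             acc = False
--             for v in reversed(ok):
--                 acc = acc or v
--                 new.append(acc)
--             new.reverse()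
--             ok = new
--         else:
--             ok = [bool(i < n and path[i] == pattern[j] and ok[i + 1])
--                   for i in range(n + 1)]
--     return ok[0]
-- ===== Notes on version B (the rewrite author's own statement) =====
-- stated objective: alternative
-- what changed: Replaces A's split-on-'*' plus greedy str.find scanning with a bottom-up dynamic program over the pattern: a boolean row ok[i] ('pattern[j:] matches a prefix of path[i:]') is updated per pattern character, a suffix-or sweep handling '*', so no splitting, substring search or wildcard-free special case remains.
import Mathlib
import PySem

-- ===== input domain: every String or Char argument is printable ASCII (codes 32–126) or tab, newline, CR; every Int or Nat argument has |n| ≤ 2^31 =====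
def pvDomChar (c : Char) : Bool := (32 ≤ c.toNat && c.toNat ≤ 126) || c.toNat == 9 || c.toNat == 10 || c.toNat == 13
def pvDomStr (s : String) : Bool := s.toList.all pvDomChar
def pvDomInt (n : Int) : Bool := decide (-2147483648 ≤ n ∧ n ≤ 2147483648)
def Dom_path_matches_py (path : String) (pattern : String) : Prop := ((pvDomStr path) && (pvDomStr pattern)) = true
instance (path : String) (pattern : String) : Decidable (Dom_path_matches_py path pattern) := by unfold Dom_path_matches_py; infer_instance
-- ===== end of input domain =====

-- B replaces A's split-on-'*' + greedy str.find loop by a bottom-up character DP over the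
-- pattern (alternative algorithm; no speed claim).


-- ===== PORT A =====
-- the 'for part in parts[1:]' loop with its running current_pos (an int, as in Python)
def pmLoopA (path : List Char) (parts : List (List Char)) (pos : Int) : Bool :=
  match parts with
  | [] => true                                  -- loop finished: return True
  | part :: rest =>
    if part.isEmpty then pmLoopA path rest pos  -- 'if not part: continue'
    else
      let p := PySem.Chars.findFrom path part pos   -- path.find(part, current_pos)
      if p = -1 then false
      else pmLoopA path rest (p + (part.length : Int))

def path_matches_py (path : String) (pattern : String) : Bool :=
  if !(PySem.Str.isIn "*" pattern) then PySem.Str.startswith path pattern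
  else
    let parts := PySem.Chars.splitOn pattern.toList ['*']     -- pattern.split("*")
    -- parts[0]: split never returns an empty list, so Python's parts[0] is headI
    if !(PySem.Chars.startswith path.toList parts.headI) then false
    else pmLoopA path.toList (PySem.List.slice parts (some 1) none) ((parts.headI.length : Int))

-- ===== PORT B =====
-- 'new = []; acc = False; for v in reversed(ok): acc = acc or v; new.append(acc); new.reverse()'
def pmSufOr (ok : List Bool) : List Bool :=
  (ok.reverse.foldl (fun (st : Bool × List Bool) v => (st.1 || v, (st.1 || v) :: st.2))
    (false, ([] : List Bool))).2

-- one iteration of Source B's 'for j in range(len(pattern) - 1, -1, -1)' loop body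
def pmStep (path : List Char) (c : Char) (ok : List Bool) : List Bool :=
  if c = '*' then pmSufOr ok
  else (List.range (path.length + 1)).map
        (fun i => decide (i < path.length) && (path.getD i ' ' == c) && ok.getD (i + 1) false)

-- the DP rows for pattern suffixes, j = len(pattern) down to 0 (Source B's backwards loop)
def pmRows (path : List Char) : List Char → List Bool
  | [] => List.replicate (path.length + 1) true   -- ok = [True] * (n + 1)
  | c :: rest => pmStep path c (pmRows path rest)

def path_matches_py_alt (path : String) (pattern : String) : Bool :=
  (pmRows path.toList pattern.toList).getD 0 false    -- return ok[0]

-- ===== PRECONDITION & SPEC =====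
def Spec_path_matches_py (path : String) (pattern : String) (out : Bool) : Prop := out = path_matches_py_alt path pattern
instance (path : String) (pattern : String) (out : Bool) : Decidable (Spec_path_matches_py path pattern out) := by unfold Spec_path_matches_py; infer_instance

-- ===== CLAIM (what is proved, stated in full; the proofs are below) =====
def Claim_equal_path_matches_py : Prop := ∀ (path : String) (pattern : String), Dom_path_matches_py path pattern → Spec_path_matches_py path pattern (path_matches_py path pattern)

-- ===== LEMMAS AND PROOFS =====

def mySplit : List Char → List (List Char)
  | [] => [[]]
  | c :: rest =>
    if c = '*' then [] :: mySplit rest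
    else
      match mySplit rest with
      | [] => [[c]]
      | h :: t => (c :: h) :: t
def Floats : List (List Char) → List Char → Prop
  | [], _ => True
  | p :: ps, s => ∃ j : Nat, p <+: s.drop j ∧ Floats ps (s.drop (j + p.length))
def Anchor (ps : List (List Char)) (s : List Char) : Prop :=
  ps.headI <+: s ∧ Floats ps.tail (s.drop ps.headI.length)
def pmConsHead (x : List Char) : List (List Char) → List (List Char)
  | [] => [x]
  | h :: t => (x ++ h) :: t

theorem mySplit_ne_nil (s : List Char) : mySplit s ≠ [] := by
  cases s with
  | nil => simp [mySplit]
  | cons c rest =>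
    simp only [mySplit]
    split
    · simp
    · split <;> simp

theorem splitOn_go_eq (fuel : Nat) (l cur : List Char) (acc : List (List Char))
    (h : l.length < fuel) :
    PySem.Chars.splitOn.go ['*'] fuel l cur acc
      = acc.reverse ++ pmConsHead cur.reverse (mySplit l) := by
  induction fuel generalizing l cur acc with
  | zero => omega
  | succ f ih =>
    cases l with
    | nil =>
      rw [PySem.Chars.splitOn.go]
      simp [mySplit, pmConsHead]
      omega
    | cons c rest =>
      rw [PySem.Chars.splitOn.go]
      by_cases hc : c = '*'
      · subst hc
        simp only [List.isPrefixOf, List.isPrefixOf_nil_left, Bool.and_true, beq_self_eq_true,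
          if_pos, List.length_cons, List.length_nil, List.drop_succ_cons, List.drop_zero]
        rw [ih rest [] (cur.reverse :: acc) (by simp at h; omega)]
        simp [mySplit, pmConsHead]
        cases hms : mySplit rest with
        | nil => exact absurd hms (mySplit_ne_nil rest)
        | cons mh mt => simp [pmConsHead]
      · have hpre : (['*'].isPrefixOf (c :: rest)) = false := by
          cases hceq : (('*' : Char) == c) with
          | false => simp [List.isPrefixOf, hceq]
          | true => exact absurd (beq_iff_eq.mp hceq).symm hc
        rw [hpre]
        simp only [Bool.false_eq_true, if_false]
        rw [ih rest (c :: cur) acc (by simp at h; omega)]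
        simp only [mySplit, if_neg hc, List.reverse_cons]
        cases hms : mySplit rest with
        | nil => exact absurd hms (mySplit_ne_nil rest)
        | cons mh mt => simp [pmConsHead]

theorem splitOn_eq_mySplit (s : List Char) :
    PySem.Chars.splitOn s ['*'] = mySplit s := by
  unfold PySem.Chars.splitOn
  rw [splitOn_go_eq s.length.succ s [] [] (Nat.lt_succ_self _)]
  cases hms : mySplit s with
  | nil => exact absurd hms (mySplit_ne_nil s)
  | cons mh mt => simp [pmConsHead]

theorem mySplit_no_star (s : List Char) (h : '*' ∉ s) : mySplit s = [s] := by
  induction s with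
  | nil => rfl
  | cons c rest ih =>
    simp only [List.mem_cons, not_or] at h
    simp only [mySplit, if_neg (fun (hc : c = '*') => h.1 hc.symm), ih h.2]

theorem Floats_append (ps : List (List Char)) (u t : List Char)
    (h : Floats ps t) : Floats ps (u ++ t) := by
  cases ps with
  | nil => trivial
  | cons p ps =>
    obtain ⟨j, hp, hf⟩ := h
    refine ⟨u.length + j, ?_, ?_⟩
    · rw [List.drop_length_add_append]; exact hp
    · have : u.length + j + p.length = u.length + (j + p.length) := by omega
      rw [this, List.drop_length_add_append]; exact hf

theorem singleton_infix_iff (a : Char) (l : List Char) : [a] <:+: l ↔ a ∈ l := by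
  constructor
  · intro h
    exact List.singleton_sublist.mp h.sublist
  · intro h
    obtain ⟨s, t, rfl⟩ := List.append_of_mem h
    exact ⟨s, t, by simp⟩

theorem Floats_drop (ps : List (List Char)) (s : List Char) (k : Nat)
    (h : Floats ps (s.drop k)) : Floats ps s := by
  have : s = s.take k ++ s.drop k := (List.take_append_drop k s).symm
  rw [this]
  exact Floats_append ps _ _ h

theorem Floats_nil_cons (ps : List (List Char)) (s : List Char) :
    Floats ([] :: ps) s ↔ Floats ps s := by
  constructor
  · rintro ⟨j, -, hf⟩
    simp only [List.length_nil, Nat.add_zero] at hf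
    exact Floats_drop ps s j hf
  · intro h
    exact ⟨0, List.nil_prefix, by simpa using h⟩

theorem Floats_cons_iff (p : List Char) (ps : List (List Char)) (s : List Char) :
    Floats (p :: ps) s ↔ ∃ k ≤ s.length, Anchor (p :: ps) (s.drop k) := by
  constructor
  · rintro ⟨j, hp, hf⟩
    by_cases hj : j ≤ s.length
    · exact ⟨j, hj, hp, by simpa [List.drop_drop, Nat.add_comm] using hf⟩
    · have hsj : s.drop j = [] := List.drop_eq_nil_of_le (by omega)
      have hpnil : p = [] := List.prefix_nil.mp (hsj ▸ hp)
      subst hpnil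
      refine ⟨s.length, le_refl _, ?_, ?_⟩
      · exact List.nil_prefix
      · show Floats ps ((s.drop s.length).drop ([] : List Char).length)
        simp only [List.length_nil, Nat.add_zero] at hf
        rw [hsj] at hf
        simpa [List.drop_length] using hf
  · rintro ⟨k, hk, hp, hf⟩
    exact ⟨k, hp, by simpa [List.drop_drop, Nat.add_comm] using hf⟩

theorem loopA_iff (path : List Char) (parts : List (List Char)) (pos : Nat)
    (hpos : pos ≤ path.length) :
    pmLoopA path parts (pos : Int) = true ↔ Floats parts (path.drop pos) := by
  induction parts generalizing pos with
  | nil => simp [pmLoopA, Floats]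
  | cons part rest ih =>
    by_cases hemp : part.isEmpty
    · rw [List.isEmpty_iff] at hemp
      subst hemp
      rw [pmLoopA, if_pos (by simp), Floats_nil_cons]
      exact ih pos hpos
    · rw [pmLoopA, if_neg hemp]
      rw [PySem.Chars.findFrom_natCast path part pos hpos]
      set q := PySem.Chars.find (path.drop pos) part with hq
      by_cases hneg : q = -1
      · rw [if_pos hneg]
        simp only [if_pos rfl]  -- p = -1 branch
        constructor
        · intro h; exact absurd h (by simp)
        · rintro ⟨j, hp, -⟩
          have : part <:+: path.drop pos := by
            rw [← PySem.Chars.isIn_iff_infix, ← PySem.Chars.exists_prefix_drop_iff_isIn]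
            exact ⟨j, by simpa [List.drop_drop, Nat.add_comm] using hp⟩
          rw [PySem.Chars.find_eq_neg_one_iff] at hneg
          exact absurd this hneg
      · rw [if_neg hneg]
        have hq0 : 0 ≤ q := by
          have := PySem.Chars.neg_one_le_find (path.drop pos) part
          rw [← hq] at this; omega
        have hql : q ≤ (path.drop pos).length := by
          have := PySem.Chars.find_le_length (path.drop pos) part
          rw [← hq] at this; exact_mod_cast this
        obtain ⟨hfp, hfmin⟩ := PySem.Chars.find_spec (s := path.drop pos) (sub := part) (by rw [← hq]; exact hq0)
        rw [← hq] at hfp hfmin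
        have hlenle := List.IsPrefix.length_le hfp
        simp only [List.length_drop] at hlenle hql
        have hppos : ((pos : Int) + q ≠ -1) := by omega
        rw [if_neg hppos]
        have hcast : (pos : Int) + q + (part.length : Int) = ((pos + q.toNat + part.length : Nat) : Int) := by
          omega
        rw [hcast]
        have hlen : pos + q.toNat + part.length ≤ path.length := by omega
        rw [ih (pos + q.toNat + part.length) hlen]
        constructor
        · intro hf
          refine ⟨q.toNat, by simpa [List.drop_drop, Nat.add_comm] using hfp, ?_⟩
          show Floats rest ((path.drop pos).drop (q.toNat + part.length))
          rw [List.drop_drop]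
          have e : pos + (q.toNat + part.length) = pos + q.toNat + part.length := by omega
          rw [e]; exact hf
        · rintro ⟨j, hp, hf⟩
          have hp' : part <+: path.drop (pos + j) := by
            simpa [List.drop_drop, Nat.add_comm] using hp
          have hjge : q.toNat ≤ j := by
            by_contra hlt
            exact hfmin j (by omega) (by simpa [List.drop_drop, Nat.add_comm] using hp')
          rw [List.drop_drop] at hf
          have e : pos + (j + part.length) = pos + j + part.length := by omega
          rw [e] at hf
          have e2 : path.drop (pos + j + part.length)
              = (path.drop (pos + q.toNat + part.length)).drop (j - q.toNat) := by
            rw [List.drop_drop]; congr 1; omega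
          rw [e2] at hf
          exact Floats_drop rest _ _ hf

theorem portA_iff (path pattern : String) :
    path_matches_py path pattern = true ↔ Anchor (mySplit pattern.toList) path.toList := by
  unfold path_matches_py
  by_cases hstar : PySem.Chars.isIn ['*'] pattern.toList = true
  · have hs : PySem.Str.isIn "*" pattern = true := by
      simpa [PySem.Str.isIn_eq] using hstar
    rw [hs]
    simp only [Bool.not_true, Bool.false_eq_true, if_false]
    rw [splitOn_eq_mySplit]
    cases hms : mySplit pattern.toList with
    | nil => exact absurd hms (mySplit_ne_nil _)
    | cons h t =>
      simp only [List.headI, List.tail_cons]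
      by_cases hpre : PySem.Chars.startswith path.toList h = true
      · rw [hpre]
        simp only [Bool.not_true, Bool.false_eq_true, if_false]
        rw [PySem.List.slice_from _ (by norm_num : (0:Int) ≤ 1)]
        have hlen : h.length ≤ path.toList.length :=
          List.IsPrefix.length_le ((PySem.Chars.startswith_iff _ _).mp hpre)
        rw [show ((1:Int)).toNat = 1 from rfl, List.drop_one, List.tail_cons]
        rw [loopA_iff path.toList t h.length hlen]
        unfold Anchor
        simp only [List.headI, List.tail_cons]
        constructor
        · intro hf
          exact ⟨(PySem.Chars.startswith_iff _ _).mp hpre, hf⟩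
        · exact fun hh => hh.2
      · rw [Bool.not_eq_true] at hpre
        rw [hpre]
        simp only [Bool.not_false, if_true]
        constructor
        · intro hh; exact absurd hh (by simp)
        · rintro ⟨hp, -⟩
          rw [← PySem.Chars.startswith_iff] at hp
          simp_all
  · have hs : PySem.Str.isIn "*" pattern = false := by
      have : PySem.Chars.isIn ['*'] pattern.toList = false := by
        rw [Bool.not_eq_true] at hstar; exact hstar
      simpa [PySem.Str.isIn_eq] using this
    rw [hs]
    simp only [Bool.not_false, if_true]
    have hnomem : '*' ∉ pattern.toList := by
      rw [Bool.not_eq_true, PySem.Chars.isIn_eq_false_iff] at hstar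
      exact fun hm => hstar ((singleton_infix_iff _ _).mpr hm)
    rw [mySplit_no_star _ hnomem]
    unfold Anchor
    simp only [List.headI, List.tail_cons]
    rw [show PySem.Str.startswith path pattern = PySem.Chars.startswith path.toList pattern.toList from by
      simp [PySem.Str.startswith]]
    rw [PySem.Chars.startswith_iff]
    simp [Floats]

theorem pmScan_go (xs : List Bool) (a : Bool) (acc : List Bool) :
    (xs.reverse.foldl (fun (st : Bool × List Bool) v => (st.1 || v, (st.1 || v) :: st.2))
      (a, acc)).2
      = (List.range xs.length).map (fun i => (xs.drop i).any id || a) ++ acc := by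
  induction xs using List.reverseRecOn generalizing a acc with
  | nil => simp
  | append_singleton ys x ih =>
    rw [List.reverse_append]
    simp only [List.reverse_singleton, List.singleton_append, List.foldl_cons]
    rw [ih (a || x) ((a || x) :: acc)]
    rw [List.length_append, List.length_singleton, List.range_succ, List.map_append,
      List.append_assoc]
    congr 1
    · apply List.map_congr_left
      intro i hi
      rw [List.mem_range] at hi
      rw [List.drop_append_of_le_length (Nat.le_of_lt hi), List.any_append]
      simp only [List.any_cons, List.any_nil, id, Bool.or_false]
      cases a <;> cases x <;> simp
    · simp only [List.map_cons, List.map_nil, List.singleton_append]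
      rw [List.drop_left]
      simp [Bool.or_comm]

theorem pmSufOr_eq (ok : List Bool) :
    pmSufOr ok = (List.range ok.length).map (fun i => (ok.drop i).any id) := by
  unfold pmSufOr
  rw [pmScan_go]
  simp

theorem any_drop_iff (l : List Bool) (i : Nat) :
    (l.drop i).any id = true ↔ ∃ k, i + k < l.length ∧ l.getD (i + k) false = true := by
  rw [List.any_eq_true]
  constructor
  · rintro ⟨x, hx, hid⟩
    obtain ⟨k, hk, hget⟩ := List.mem_iff_getElem.mp hx
    have hk' : i + k < l.length := by
      simp [List.length_drop] at hk; omega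
    refine ⟨k, hk', ?_⟩
    rw [List.getD_eq_getElem l false hk']
    rw [← List.getElem_drop (h := hk), hget]
    simpa using hid
  · rintro ⟨k, hk, hget⟩
    have hkd : k < (l.drop i).length := by simp [List.length_drop]; omega
    refine ⟨(l.drop i)[k], List.getElem_mem _, ?_⟩
    rw [List.getElem_drop (h := hkd)]
    rw [List.getD_eq_getElem l false hk] at hget
    simpa using hget

theorem pmRows_length (path pat : List Char) :
    (pmRows path pat).length = path.length + 1 := by
  induction pat with
  | nil => simp [pmRows]
  | cons c rest ih =>
    simp only [pmRows, pmStep]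
    split
    · rw [pmSufOr_eq]; simp [ih]
    · simp

theorem pmRows_iff (path pat : List Char) (i : Nat) (hi : i ≤ path.length) :
    (pmRows path pat).getD i false = true ↔ Anchor (mySplit pat) (path.drop i) := by
  induction pat generalizing i with
  | nil =>
    simp only [pmRows, mySplit, Anchor, List.headI, List.tail_cons]
    rw [List.getD_eq_getElem?_getD, List.getElem?_replicate, if_pos (by omega)]
    simp [Floats]
  | cons c rest ih =>
    by_cases hc : c = '*'
    · subst hc
      rw [show pmRows path ('*' :: rest) = pmSufOr (pmRows path rest) from by
        simp [pmRows, pmStep]]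
      rw [pmSufOr_eq, List.getD_eq_getElem?_getD, List.getElem?_map,
        List.getElem?_range (by rw [pmRows_length]; omega)]
      simp only [Option.map_some, Option.getD_some]
      rw [any_drop_iff, pmRows_length]
      rw [show mySplit ('*' :: rest) = [] :: mySplit rest from by simp [mySplit]]
      cases hms : mySplit rest with
      | nil => exact absurd hms (mySplit_ne_nil _)
      | cons h t =>
        simp only [Anchor, List.headI, List.tail_cons, List.length_nil, List.drop_zero]
        rw [Floats_cons_iff]
        constructor
        · rintro ⟨k, hk, hget⟩
          refine ⟨List.nil_prefix, k, by simp only [List.length_drop]; omega, ?_⟩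
          have hanch := (ih (i + k) (by omega)).mp hget
          rw [hms] at hanch
          rwa [List.drop_drop]
        · rintro ⟨-, k, hk, hanch⟩
          simp only [List.length_drop] at hk
          refine ⟨k, by omega, ?_⟩
          rw [ih (i + k) (by omega), hms]
          rwa [List.drop_drop] at hanch
    · simp only [pmRows, pmStep, if_neg hc]
      rw [List.getD_eq_getElem?_getD, List.getElem?_map,
        List.getElem?_range (by omega)]
      simp only [Option.map_some, Option.getD_some]
      cases hms : mySplit rest with
      | nil => exact absurd hms (mySplit_ne_nil _)
      | cons h t =>
        simp only [mySplit, if_neg hc, hms, Anchor, List.headI, List.tail_cons]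
        by_cases hin : i < path.length
        · rw [List.drop_eq_getElem_cons hin]
          rw [List.cons_prefix_cons]
          rw [decide_eq_true hin]
          simp only [Bool.true_and, Bool.and_eq_true, beq_iff_eq]
          rw [List.getD_eq_getElem path ' ' hin]
          have hih := ih (i + 1) (by omega)
          rw [hms] at hih
          simp only [Anchor, List.headI, List.tail_cons] at hih
          rw [hih]
          constructor
          · rintro ⟨hgc, hh, hfl⟩
            refine ⟨⟨hgc.symm, hh⟩, ?_⟩
            show Floats t ((path[i] :: path.drop (i + 1)).drop (h.length + 1))
            simp only [List.drop_succ_cons]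
            exact hfl
          · rintro ⟨⟨hgc, hh⟩, hfl⟩
            refine ⟨hgc.symm, hh, ?_⟩
            have e : i + (h.length + 1) = i + 1 + h.length := by omega
            simpa [e] using hfl
        · have hieq : i = path.length := by omega
          subst hieq
          simp only [List.drop_length]
          constructor
          · intro hcontra; simp at hcontra
          · rintro ⟨hp, -⟩
            exact absurd hp (by simp)

theorem portB_iff (path pattern : String) :
    path_matches_py_alt path pattern = true ↔ Anchor (mySplit pattern.toList) path.toList := by
  unfold path_matches_py_alt
  rw [pmRows_iff path.toList pattern.toList 0 (Nat.zero_le _)]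
  simp

-- ===== VERDICT (by name: the statement is the Claim_ definition above) =====
theorem path_matches_py_spec : Claim_equal_path_matches_py := by
  intro path pattern _
  unfold Spec_path_matches_py
  have ha := portA_iff path pattern
  have hb := portB_iff path pattern
  cases h1 : path_matches_py path pattern <;> cases h2 : path_matches_py_alt path pattern <;>
    simp_all
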